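-- pv_equiv track=rewrite | github.com/Grejonaa/crypto-ciphers-project | src/redefence_cipher.py | build_zigzag_rails
-- ===== SOURCE A (Python) =====
-- def build_zigzag_rails(plaintext, rail_count):
--     if rail_count <= 0:
--         raise ValueError("Numri i rails duhet te jete me i madh se 0.")
--
--     if rail_count == 1:
--         return [plaintext]
--
--     if len(plaintext) <= 1:
--         rails = [""] * rail_count
--         if len(plaintext) == 1:
--             rails[0] = plaintext
--         return rails
--
--     rails = [""] * rail_count
--     current_row = 0
--     direction = 1  # 1 = poshte, -1 = lart
--
--     for ch in plaintext:
--         rails[current_row] += ch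
--
--         if current_row == 0:
--             direction = 1
--         elif current_row == rail_count - 1:
--             direction = -1
--
--         current_row += direction
--
--     return rails
-- ===== SOURCE B (Python) =====
-- def build_zigzag_rails(plaintext, rail_count):
--     if rail_count <= 0:
--         raise ValueError("Numri i rails duhet te jete me i madh se 0.")
--     if rail_count == 1:
--         return [plaintext]
--     cycle = 2 * (rail_count - 1)
--     rails = [""] * rail_count
--     for i, ch in enumerate(plaintext):
--         pos = i % cycle
--         rail = pos if pos < rail_count else cycle - pos
--         rails[rail] += ch
--     return rails
-- ===== Notes on version B (the rewrite author's own statement) =====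
-- stated objective: idiomatic
-- what changed: B replaces A's stateful direction-flip row tracking (current_row/direction mutated per char, plus a special-cased len<=1 branch) with a closed-form zigzag mapping: each char's rail is computed directly from its index as i % (2*(rail_count-1)) folded back over the ridge, with no direction state and no length special cases.
import Mathlib
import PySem

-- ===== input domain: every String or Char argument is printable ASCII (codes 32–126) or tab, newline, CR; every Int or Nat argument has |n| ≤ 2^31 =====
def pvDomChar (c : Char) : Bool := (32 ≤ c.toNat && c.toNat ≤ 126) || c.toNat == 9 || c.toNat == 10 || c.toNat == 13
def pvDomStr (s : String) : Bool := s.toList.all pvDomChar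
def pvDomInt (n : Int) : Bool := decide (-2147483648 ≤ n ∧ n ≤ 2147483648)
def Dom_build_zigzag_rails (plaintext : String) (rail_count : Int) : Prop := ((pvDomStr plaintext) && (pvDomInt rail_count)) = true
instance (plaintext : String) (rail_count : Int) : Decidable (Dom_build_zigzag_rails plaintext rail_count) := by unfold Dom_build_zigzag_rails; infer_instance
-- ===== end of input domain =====

-- B computes each character's rail by a closed-form zigzag index from i % (2*(rail_count-1))
-- instead of A's mutable direction flip; equivalence proved for all rail_count ≥ 1 (A raises ValueError otherwise).

-- ===== PORT A =====
-- Rails are carried as List (List Char) (the PySem representation of Python strings) and turned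
-- into String at the end; rails[current_row] += ch is the exact get-then-set at that index.
def pvLoopA (rc : Int) (chars : List Char) (rails : List (List Char)) (row dir : Int) : List (List Char) :=
  match chars with
  | [] => rails
  | ch :: rest =>
    let rails' := PySem.List.pySetD rails row (PySem.List.pyGetD rails row [] ++ [ch])
    let dir' := if row = 0 then (1 : Int) else if row = rc - 1 then -1 else dir
    pvLoopA rc rest rails' (row + dir') dir'

def build_zigzag_rails (plaintext : String) (rail_count : Int) : List String :=
  if rail_count ≤ 0 then []   -- Python raises ValueError here; excluded by Pre_
  else if rail_count = 1 then [plaintext]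
  else if plaintext.toList.length ≤ 1 then
    let rails := List.replicate rail_count.toNat ("" : String)
    if plaintext.toList.length = 1 then PySem.List.pySetD rails 0 plaintext else rails
  else
    (pvLoopA rail_count plaintext.toList (List.replicate rail_count.toNat []) 0 1).map String.ofList

-- ===== PORT B =====
-- Source B's enumerate loop, carrying the running index i (a Nat: enumerate indices are 0,1,2,…;
-- i % cycle in Nat agrees with Python's % on these nonnegative values).
def pvLoopB (rc cycle : Nat) (chars : List Char) (i : Nat) (rails : List (List Char)) : List (List Char) :=
  match chars with
  | [] => rails
  | ch :: rest =>
    let pos := i % cycle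
    let rail := if pos < rc then pos else cycle - pos
    pvLoopB rc cycle rest (i + 1) (rails.set rail (rails.getD rail [] ++ [ch]))

def build_zigzag_rails_alt (plaintext : String) (rail_count : Int) : List String :=
  if rail_count ≤ 0 then []   -- Source B raises ValueError here; excluded by Pre_
  else if rail_count = 1 then [plaintext]
  else
    (pvLoopB rail_count.toNat (2 * (rail_count.toNat - 1)) plaintext.toList 0
      (List.replicate rail_count.toNat [])).map String.ofList

-- ===== PRECONDITION & SPEC =====
-- Pre_ excludes exactly rail_count ≤ 0, where the Python A raises ValueError (B raises it too).
def Pre_build_zigzag_rails (plaintext : String) (rail_count : Int) : Prop := 1 ≤ rail_count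
instance (plaintext : String) (rail_count : Int) : Decidable (Pre_build_zigzag_rails plaintext rail_count) := by unfold Pre_build_zigzag_rails; infer_instance
def pvWitness_build_zigzag_rails : String × Int := ("HELLO WORLD", 3)

def Spec_build_zigzag_rails (plaintext : String) (rail_count : Int) (out : List String) : Prop := out = build_zigzag_rails_alt plaintext rail_count
instance (plaintext : String) (rail_count : Int) (out : List String) : Decidable (Spec_build_zigzag_rails plaintext rail_count out) := by unfold Spec_build_zigzag_rails; infer_instance

-- ===== CLAIM (what is proved, stated in full; the proofs are below) =====
def Claim_equal_build_zigzag_rails : Prop := ∀ (plaintext : String) (rail_count : Int), Dom_build_zigzag_rails plaintext rail_count → Pre_build_zigzag_rails plaintext rail_count → Spec_build_zigzag_rails plaintext rail_count (build_zigzag_rails plaintext rail_count)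

-- ===== LEMMAS AND PROOFS =====

-- The closed-form rail index B assigns to a char at cycle position p (B's inline expression).
def pvZig (n p : Nat) : Nat := if p < n then p else 2 * (n - 1) - p

-- One zigzag step: advancing A's row by the freshly updated direction lands on the closed-form
-- rail of the next cycle position, and the direction invariant is maintained.
lemma pvZig_step (n p : Nat) (dir : Int) (hn : 2 ≤ n) (hp : p < 2 * (n - 1))
    (hdir : 1 ≤ p → p ≠ n - 1 → dir = if p < n - 1 then 1 else -1) :
    (let p' := if p + 1 = 2 * (n - 1) then 0 else p + 1
     let dir' := if (pvZig n p : Int) = 0 then (1 : Int)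
                 else if (pvZig n p : Int) = (n : Int) - 1 then -1 else dir
     ((pvZig n p : Int) + dir' = (pvZig n p' : Int)) ∧
       (1 ≤ p' → p' ≠ n - 1 → dir' = if p' < n - 1 then 1 else -1)) := by
  simp only [pvZig]
  split_ifs <;> refine ⟨?_, ?_⟩ <;> omega

lemma pvMod_step (c i : Nat) (hc : 2 ≤ c) :
    (i + 1) % c = if i % c + 1 = c then 0 else i % c + 1 := by
  have h1 : 1 % c = 1 := Nat.mod_eq_of_lt (by omega)
  have hm : i % c < c := Nat.mod_lt i (by omega)
  rw [Nat.add_mod, h1]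
  by_cases hh : i % c + 1 = c
  · rw [if_pos hh, hh, Nat.mod_self]
  · rw [Nat.mod_eq_of_lt (by omega), if_neg hh]

-- Loop correspondence: A's stateful loop, started at row = pvZig n (i % cycle) with a direction
-- compatible with the cycle position, equals B's indexed loop started at index i.
lemma pvLoop_eq (n : Nat) (hn : 2 ≤ n) (chars : List Char) (i : Nat) (dir : Int)
    (rails : List (List Char))
    (hdir : 1 ≤ i % (2 * (n - 1)) → i % (2 * (n - 1)) ≠ n - 1 →
      dir = if i % (2 * (n - 1)) < n - 1 then 1 else -1) :
    pvLoopA (n : Int) chars rails ((pvZig n (i % (2 * (n - 1))) : Nat) : Int) dir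
      = pvLoopB n (2 * (n - 1)) chars i rails := by
  induction chars generalizing i dir rails with
  | nil => rfl
  | cons ch rest ih =>
    have hp : i % (2 * (n - 1)) < 2 * (n - 1) := Nat.mod_lt i (by omega)
    obtain ⟨hrow, hdir'⟩ := pvZig_step n (i % (2 * (n - 1))) dir hn hp hdir
    have hm := pvMod_step (2 * (n - 1)) i (by omega)
    rw [← hm] at hrow hdir'
    simp only [pvLoopA, pvLoopB, PySem.List.pySetD_natCast, PySem.List.pyGetD_natCast]
    rw [show (if i % (2 * (n - 1)) < n then i % (2 * (n - 1))
              else 2 * (n - 1) - i % (2 * (n - 1))) = pvZig n (i % (2 * (n - 1))) from rfl,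
        hrow]
    exact ih (i + 1) _ _ hdir'

-- ===== VERDICT (by name: the statement is the Claim_ definition above) =====
theorem build_zigzag_rails_spec : Claim_equal_build_zigzag_rails := by
  intro pt rc _ hpre
  unfold Pre_build_zigzag_rails at hpre
  unfold Spec_build_zigzag_rails build_zigzag_rails build_zigzag_rails_alt
  rw [if_neg (by omega : ¬ rc ≤ 0), if_neg (by omega : ¬ rc ≤ 0)]
  by_cases h1 : rc = 1
  · rw [if_pos h1, if_pos h1]
  · rw [if_neg h1, if_neg h1]
    have hn : 2 ≤ rc.toNat := by omega
    have hn0 : 0 < rc.toNat := by omega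
    rcases hL : pt.toList with - | ⟨ch, rest⟩
    · simp [pvLoopB, List.map_replicate]
    · rcases rest with - | ⟨ch2, rest2⟩
      · -- single character: A sets rails[0] := plaintext, B's loop places it on rail 0
        have hpt : String.ofList [ch] = pt := by rw [← hL, String.ofList_toList]
        simp only [List.length_cons, List.length_nil]
        rw [if_pos (by omega)]
        simp [pvLoopB, Nat.zero_mod, hn0, pysem, List.map_set, List.map_replicate, hpt]
      · -- length ≥ 2: the two loops agree
        simp only [List.length_cons]
        rw [if_neg (by omega)]
        have hz : ((pvZig rc.toNat (0 % (2 * (rc.toNat - 1))) : Nat) : Int) = 0 := by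
          simp [pvZig]; omega
        have h := pvLoop_eq rc.toNat hn (ch :: ch2 :: rest2) 0 1
          (List.replicate rc.toNat []) (by intro h _; rw [Nat.zero_mod] at h; omega)
        rw [hz] at h
        rw [show ((rc.toNat : Nat) : Int) = rc from Int.toNat_of_nonneg (by omega)] at h
        rw [h]
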